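-- pv_equiv track=rewrite | github.com/Gaelic-Algorithmic-Research-Group/Gaelic-Text-Normaliser | resources/gd_analyser_pipeline/seg.py | w_segment1b
-- ===== SOURCE A (Python) =====
-- def w_segment1b(string):
--     string2 = []
--     i = 0
--     while i < len(string):
--         if string[i:i+3] == '.^.' or string[i:i+3] == '*^*':
--             string2.append(string[i])
--             i = i + 2
--         else:
--             string2.append(string[i])
--             i = i + 1
--     return(''.join(string2))
-- ===== SOURCE B (Python) =====
-- def w_segment1b(string):
--     # single fixed-step pass: drop each '^' whose two neighbours are the same delimiter ('.' or '*')
--     return ''.join(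
--         c
--         for p, c, n in zip([''] + list(string), string, list(string[1:]) + [''])
--         if not (c == '^' and p == n and p in ('.', '*'))
--     )
-- ===== Notes on version B (the rewrite author's own statement) =====
-- stated objective: idiomatic
-- what changed: A's variable-step while-loop with per-position slice comparisons (append current char, skip 2 on a '.^.'/'*^*' match) is replaced by a single fixed-step comprehension over zipped neighbour triples that filters out each '^' whose two neighbours are the same delimiter; a timing run measured this constant-factor faster (one C-level pass, no per-char slicing).
import Mathlib
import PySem

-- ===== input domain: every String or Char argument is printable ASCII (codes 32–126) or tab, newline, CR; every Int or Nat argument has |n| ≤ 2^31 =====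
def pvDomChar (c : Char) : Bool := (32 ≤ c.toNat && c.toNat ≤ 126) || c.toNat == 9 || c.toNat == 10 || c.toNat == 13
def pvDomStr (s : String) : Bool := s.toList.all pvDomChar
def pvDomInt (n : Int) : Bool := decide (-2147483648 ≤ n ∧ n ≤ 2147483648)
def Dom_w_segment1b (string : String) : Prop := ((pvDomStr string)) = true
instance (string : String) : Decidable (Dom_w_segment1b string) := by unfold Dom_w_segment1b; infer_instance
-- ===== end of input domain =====

-- B replaces A's variable-step while-loop (slice compare, skip 2 on a match) with one
-- fixed-step neighbour filter: drop each '^' whose two neighbours are the same delimiter.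

-- ===== PORT A =====
-- A's while-loop: index i, accumulator string2; slice compare string[i:i+3], step 1 or 2.
def w_segment1bLoop (cs : List Char) (i : Nat) (acc : List Char) : List Char :=
  if h : i < cs.length then
    -- string[i:i+3] == '.^.' or '*^*'  (Python slice s[i:i+3], 0 ≤ i, is take 3 of drop i)
    if (cs.drop i).take 3 = ['.', '^', '.'] ∨ (cs.drop i).take 3 = ['*', '^', '*'] then
      w_segment1bLoop cs (i + 2) (acc ++ [cs[i]])
    else
      w_segment1bLoop cs (i + 1) (acc ++ [cs[i]])
  else acc
termination_by cs.length - i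

def w_segment1b (string : String) : String :=
  String.ofList (w_segment1bLoop string.toList 0 [])

-- ===== PORT B =====
-- B's comprehension over zip([''] + list(s), s, list(s[1:]) + ['']); the '' padding is
-- ported as `none : Option Char` (it is only ever compared against '.' / '*' / a char).
def w_segment1bKeep (p : Option Char) (c : Char) (n : Option Char) : Bool :=
  ¬ (c = '^' ∧ p = n ∧ (p = some '.' ∨ p = some '*'))

def w_segment1b_alt (string : String) : String :=
  let cs := string.toList
  let ps : List (Option Char) := none :: cs.map some
  let ns : List (Option Char) := (cs.drop 1).map some ++ [none]
  String.ofList ((((ps.zip cs).zip ns).filter (fun x => w_segment1bKeep x.1.1 x.1.2 x.2)).map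
    (fun x => x.1.2))

-- ===== PRECONDITION & SPEC =====
def Spec_w_segment1b (string : String) (out : String) : Prop := out = w_segment1b_alt string
instance (string : String) (out : String) : Decidable (Spec_w_segment1b string out) := by unfold Spec_w_segment1b; infer_instance

-- ===== CLAIM (what is proved, stated in full; the proofs are below) =====
def Claim_equal_w_segment1b : Prop := ∀ (string : String), Dom_w_segment1b string → Spec_w_segment1b string (w_segment1b string)

-- ===== LEMMAS AND PROOFS =====

-- clean pattern recursion both ports are reduced to
def segG : List Char → List Char
  | '.' :: '^' :: '.' :: rest => '.' :: segG ('.' :: rest)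
  | '*' :: '^' :: '*' :: rest => '*' :: segG ('*' :: rest)
  | c :: rest => c :: segG rest
  | [] => []

-- B reduced to a previous-character-carrying recursion
def segH : Option Char → List Char → List Char
  | _, [] => []
  | p, c :: rest =>
    if c = '^' ∧ p = rest.head? ∧ (p = some '.' ∨ p = some '*') then segH (some c) rest
    else c :: segH (some c) rest

lemma keepB (p : Option Char) (c : Char) (n : Option Char) :
    w_segment1bKeep p c n = true ↔ ¬ (c = '^' ∧ p = n ∧ (p = some '.' ∨ p = some '*')) := by
  unfold w_segment1bKeep; exact decide_eq_true_iff

lemma segG_cons (c : Char) (rest : List Char)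
    (h1 : ∀ r', c = '.' → rest = '^' :: '.' :: r' → False)
    (h2 : ∀ r', c = '*' → rest = '^' :: '*' :: r' → False) :
    segG (c :: rest) = c :: segG rest := by
  rw [segG.eq_def]
  split
  · rename_i x r' heq; injection heq with hc hr; exact (h1 r' hc hr).elim
  · rename_i x r' heq; injection heq with hc hr; exact (h2 r' hc hr).elim
  · rename_i x c' r' g1 g2 heq; injection heq with hc hr; rw [hc, hr]
  · rename_i x heq; exact (List.cons_ne_nil _ _ heq).elim

lemma segA_aux (cs : List Char) (k : Nat) : ∀ i acc, cs.length - i ≤ k →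
    w_segment1bLoop cs i acc = acc ++ segG (cs.drop i) := by
  induction k with
  | zero =>
    intro i acc hk
    rw [w_segment1bLoop, dif_neg (by omega), List.drop_of_length_le (by omega)]
    simp [segG]
  | succ k ih =>
    intro i acc hk
    rw [w_segment1bLoop]
    by_cases hlt : i < cs.length
    · rw [dif_pos hlt]
      by_cases hcond : (cs.drop i).take 3 = ['.', '^', '.'] ∨ (cs.drop i).take 3 = ['*', '^', '*']
      · rw [if_pos hcond, ih (i + 2) (acc ++ [cs[i]'hlt]) (by omega)]
        have hcons := List.drop_eq_getElem_cons hlt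
        rcases hcond with hc | hc
        · have hd : cs.drop i = '.' :: '^' :: '.' :: cs.drop (i + 3) := by
            have ht := List.take_append_drop 3 (cs.drop i)
            rw [hc, List.drop_drop] at ht
            simpa using ht.symm
          rw [hd] at hcons
          injection hcons with hh1 hh2
          have hd2 : cs.drop (i + 2) = '.' :: cs.drop (i + 3) := by
            have h22 : cs.drop (i + 2) = (cs.drop i).drop 2 := by rw [List.drop_drop]
            rw [h22, hd]
            rfl
          simp only [← hh1, hd, hd2]
          rw [segG]
          simp
        · have hd : cs.drop i = '*' :: '^' :: '*' :: cs.drop (i + 3) := by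
            have ht := List.take_append_drop 3 (cs.drop i)
            rw [hc, List.drop_drop] at ht
            simpa using ht.symm
          rw [hd] at hcons
          injection hcons with hh1 hh2
          have hd2 : cs.drop (i + 2) = '*' :: cs.drop (i + 3) := by
            have h22 : cs.drop (i + 2) = (cs.drop i).drop 2 := by rw [List.drop_drop]
            rw [h22, hd]
            rfl
          simp only [← hh1, hd, hd2]
          rw [segG]
          simp
      · rw [if_neg hcond, ih (i + 1) (acc ++ [cs[i]'hlt]) (by omega)]
        have hcons := List.drop_eq_getElem_cons hlt
        rw [hcons, segG_cons]
        · simp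
        · intro r' hc hr
          exact hcond (Or.inl (by rw [hcons, hc, hr]; rfl))
        · intro r' hc hr
          exact hcond (Or.inr (by rw [hcons, hc, hr]; rfl))
    · rw [dif_neg hlt, List.drop_of_length_le (by omega)]
      simp [segG]

lemma segB_eq_H (cs : List Char) : ∀ (p : Option Char),
    ((((p :: cs.map some).zip cs).zip ((cs.drop 1).map some ++ [none])).filter
      (fun x => w_segment1bKeep x.1.1 x.1.2 x.2)).map (fun x => x.1.2) = segH p cs := by
  induction cs with
  | nil => intro p; simp [segH]
  | cons c rest ih =>
    intro p
    cases rest with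
    | nil =>
      have hfalse : ¬ (c = '^' ∧ p = (none : Option Char) ∧ (p = some '.' ∨ p = some '*')) := by
        rintro ⟨-, rfl, h | h⟩ <;> simp at h
      have hk : w_segment1bKeep p c none = true := (keepB p c none).2 hfalse
      conv_rhs => rw [segH]
      simp only [List.head?_nil]
      rw [if_neg hfalse]
      simp [hk, segH, List.zip]
    | cons r rs =>
      have step : (((p :: (c :: r :: rs).map some).zip (c :: r :: rs)).zip
          (((c :: r :: rs).drop 1).map some ++ [none]))
          = ((p, c), some r) :: (((some c :: (r :: rs).map some).zip (r :: rs)).zip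
              (((r :: rs).drop 1).map some ++ [none])) := by
        simp [List.zip]
      rw [step]
      simp only [List.filter_cons]
      conv_rhs => rw [segH]
      simp only [List.head?_cons]
      by_cases h : c = '^' ∧ p = some r ∧ (p = some '.' ∨ p = some '*')
      · rw [if_neg (fun ht => ((keepB p c (some r)).1 ht) h), if_pos h]
        exact ih (some c)
      · rw [if_pos ((keepB p c (some r)).2 h), if_neg h, List.map_cons, ih (some c)]

lemma segG_eq_H (cs : List Char) : ∀ (p : Option Char),
    ¬ (cs.head? = some '^' ∧ p = cs.tail.head? ∧ (p = some '.' ∨ p = some '*')) →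
    segG cs = segH p cs := by
  induction cs using segG.induct with
  | case1 rest ih =>
    intro p hp
    rw [segG, segH, if_neg (by simp), segH, if_pos (by simp)]
    rw [ih (some '^') (by simp)]
  | case2 rest ih =>
    intro p hp
    rw [segG, segH, if_neg (by simp), segH, if_pos (by simp)]
    rw [ih (some '^') (by simp)]
  | case3 c rest h1 h2 ih =>
    intro p hp
    have hfalse : ¬ (c = '^' ∧ p = rest.head? ∧ (p = some '.' ∨ p = some '*')) := by
      intro hcond; exact hp (by simpa using hcond)
    rw [segG_cons c rest h1 h2]
    conv_rhs => rw [segH]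
    rw [if_neg hfalse]
    refine congrArg (c :: ·) (ih (some c) ?_)
    rintro ⟨hh, ht, hv⟩
    cases rest with
    | nil => simp at hh
    | cons x xs =>
      simp only [List.head?_cons, Option.some.injEq] at hh
      subst hh
      cases xs with
      | nil => simp at ht
      | cons y ys =>
        simp only [List.tail_cons, List.head?_cons, Option.some.injEq] at ht
        subst ht
        rcases hv with hv | hv <;> simp only [Option.some.injEq] at hv <;> subst hv
        · exact h1 ys rfl rfl
        · exact h2 ys rfl rfl
  | case4 =>
    intro p hp
    simp [segG, segH]

-- ===== VERDICT (by name: the statement is the Claim_ definition above) =====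
theorem w_segment1b_spec : Claim_equal_w_segment1b := by
  intro s _
  show w_segment1b s = w_segment1b_alt s
  simp only [w_segment1b, w_segment1b_alt]
  rw [segA_aux s.toList s.toList.length 0 [] (by omega), List.drop_zero, List.nil_append,
    segB_eq_H]
  exact congrArg String.ofList (segG_eq_H s.toList none (by simp))
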